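-- pv_equiv track=rewrite | github.com/dengguojie/vue-element-admin | auto_schedule/python/tbe/dsl/unify_schedule/vector/tuple_reduce/tuple_reduce_tilingcase_info.py | calc_reduce_pattern
-- ===== SOURCE A (Python) =====
-- from typing import List
--
-- def calc_reduce_pattern(shape: List, reduce_axis: List) -> int:
--     """
--     calculate reduce pattern
--     """
--     one_hot = [0 for _ in shape]
--     for i in reduce_axis:
--         one_hot[i] = 1
--     pattern = 0
--     for v in one_hot:
--         pattern = 2 * pattern + v
--     pattern = 10 * pattern + len(one_hot)
--     return pattern
-- ===== SOURCE B (Python) =====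
-- def calc_reduce_pattern(shape, reduce_axis):
--     """
--     calculate reduce pattern
--     """
--     n = len(shape)
--     axes = range(n)
--     positions = {axes[i] for i in reduce_axis}
--     pattern = sum(2 ** (n - 1 - p) for p in positions)
--     return pattern * 10 + n
-- ===== Notes on version B (the rewrite author's own statement) =====
-- stated objective: alternative
-- what changed: Replaces the one-hot list and the sequential doubling fold with a set of range(n)-normalized reduce positions and a closed-form sum of powers of two.
import Mathlib
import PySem

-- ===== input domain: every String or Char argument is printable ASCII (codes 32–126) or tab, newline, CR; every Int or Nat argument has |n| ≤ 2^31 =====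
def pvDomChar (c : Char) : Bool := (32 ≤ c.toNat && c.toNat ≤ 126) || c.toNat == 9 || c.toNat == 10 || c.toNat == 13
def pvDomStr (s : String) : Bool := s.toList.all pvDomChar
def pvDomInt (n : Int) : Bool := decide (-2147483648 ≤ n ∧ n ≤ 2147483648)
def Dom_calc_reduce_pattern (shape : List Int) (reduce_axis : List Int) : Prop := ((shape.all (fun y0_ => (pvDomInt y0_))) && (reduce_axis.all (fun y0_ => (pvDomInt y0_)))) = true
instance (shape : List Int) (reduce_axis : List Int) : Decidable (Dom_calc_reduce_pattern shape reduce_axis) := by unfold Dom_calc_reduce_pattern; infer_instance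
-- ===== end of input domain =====

-- B replaces A's one-hot list and doubling fold with a set of range(n)-normalized
-- positions and a direct sum of powers of two (objective: alternative algorithm, same cost).

-- ===== PORT A =====
def calc_reduce_pattern (shape : List Int) (reduce_axis : List Int) : Int :=
  let one_hot : List Int := shape.map (fun _ => 0)
  -- for i in reduce_axis: one_hot[i] = 1   (pySetD exact under Pre_: every index in range)
  let one_hot := reduce_axis.foldl (fun acc i => PySem.List.pySetD acc i 1) one_hot
  let pattern := one_hot.foldl (fun p v => 2 * p + v) 0
  10 * pattern + (one_hot.length : Int)

-- ===== PORT B =====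
def calc_reduce_pattern_alt (shape : List Int) (reduce_axis : List Int) : Int :=
  let n : Int := (shape.length : Int)
  let axes := PySem.List.pyRange 0 n 1
  -- {axes[i] for i in reduce_axis}  (pyGet? none = IndexError, excluded by Pre_)
  let positions : PySem.Set Int :=
    reduce_axis.foldl (fun s i => PySem.Set.add s ((PySem.List.pyGet? axes i).getD 0)) PySem.Set.empty
  -- 2 ** (n - 1 - p): exponent is nonnegative for p in [0, n) (toNat exact there)
  let pattern : Int := positions.foldl (fun s p => s + 2 ^ (n - 1 - p).toNat) 0
  pattern * 10 + n

-- ===== PRECONDITION & SPEC =====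
-- Pre_ excludes exactly the inputs where A raises IndexError: any axis outside [-len(shape), len(shape)).
def Pre_calc_reduce_pattern (shape : List Int) (reduce_axis : List Int) : Prop :=
  ∀ i ∈ reduce_axis, -(shape.length : Int) ≤ i ∧ i < (shape.length : Int)
instance (shape : List Int) (reduce_axis : List Int) : Decidable (Pre_calc_reduce_pattern shape reduce_axis) := by unfold Pre_calc_reduce_pattern; infer_instance
def pvWitness_calc_reduce_pattern : List Int × List Int := ([3, 4, 5], [0, -1])
def Spec_calc_reduce_pattern (shape : List Int) (reduce_axis : List Int) (out : Int) : Prop := out = calc_reduce_pattern_alt shape reduce_axis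
instance (shape : List Int) (reduce_axis : List Int) (out : Int) : Decidable (Spec_calc_reduce_pattern shape reduce_axis out) := by unfold Spec_calc_reduce_pattern; infer_instance

-- ===== CLAIM (what is proved, stated in full; the proofs are below) =====
def Claim_equal_calc_reduce_pattern : Prop := ∀ (shape : List Int) (reduce_axis : List Int), Dom_calc_reduce_pattern shape reduce_axis → Pre_calc_reduce_pattern shape reduce_axis → Spec_calc_reduce_pattern shape reduce_axis (calc_reduce_pattern shape reduce_axis)

-- ===== LEMMAS AND PROOFS =====

-- normalized position of axis i in a list of length n
def pvNorm (n : Nat) (i : Int) : Int := if i < 0 then i + n else i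

lemma pvNorm_bounds {n : Nat} {i : Int} (h1 : -(n:Int) ≤ i) (h2 : i < n) :
    0 ≤ pvNorm n i ∧ pvNorm n i < n := by
  unfold pvNorm; split_ifs <;> omega

-- range(n)[i] for an in-range axis is the normalized position
lemma pyGet_range_eq_pvNorm {n : Nat} {i : Int} (h1 : -(n:Int) ≤ i) (h2 : i < n) :
    (PySem.List.pyGet? (PySem.List.pyRange 0 n 1) i).getD 0 = pvNorm n i := by
  unfold PySem.List.pyGet? PySem.List.pyIdx? pvNorm
  rw [PySem.List.length_pyRange_one]
  have hlen : ((n:Int) - 0).toNat = n := by omega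
  rw [hlen]
  by_cases h0 : 0 ≤ i
  · rw [if_pos h0, if_pos h2, Option.bind_some, PySem.List.getElem?_pyRange_one,
        if_pos (by omega : i.toNat < ((n:Int) - 0).toNat), if_neg (by omega : ¬ i < 0)]
    simp only [Option.getD_some]
    omega
  · rw [if_neg h0, if_pos h1, Option.bind_some, PySem.List.getElem?_pyRange_one,
        if_pos (by omega : n - (-i).toNat < ((n:Int) - 0).toNat), if_pos (by omega : i < 0)]
    simp only [Option.getD_some]
    omega

-- after the setting loop, entry k of one_hot is 1 iff k is a normalized axis position
lemma foldl_set_getElem (axis : List Int) (acc : List Int) (n : Nat)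
    (hlen : acc.length = n) (hax : ∀ i ∈ axis, -(n:Int) ≤ i ∧ i < n)
    (k : Nat) (hk : k < n) :
    ∃ h : k < (axis.foldl (fun acc i => PySem.List.pySetD acc i 1) acc).length,
      (axis.foldl (fun acc i => PySem.List.pySetD acc i 1) acc)[k]'h =
        (if (k:Int) ∈ axis.map (pvNorm n) then 1 else acc[k]'(by omega)) := by
  induction axis generalizing acc with
  | nil => exact ⟨by simp only [List.foldl_nil, hlen]; exact hk, by simp⟩
  | cons a rest ih =>
    obtain ⟨ha1, ha2⟩ := hax a (by simp)
    have hset : PySem.List.pySetD acc a 1 = acc.set (pvNorm n a).toNat 1 := by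
      by_cases h0 : 0 ≤ a
      · rw [PySem.List.pySetD_of_nonneg acc 1 h0]
        congr 2
        unfold pvNorm
        rw [if_neg (by omega)]
      · unfold PySem.List.pySetD PySem.List.pySet? PySem.List.pyIdx?
        rw [hlen, if_neg h0, if_pos (by omega)]
        simp only [Option.map_some, Option.getD_some]
        congr 1
        unfold pvNorm
        rw [if_pos (by omega)]
        omega
    simp only [List.foldl_cons, hset]
    obtain ⟨hb1, hb2⟩ := pvNorm_bounds ha1 ha2
    obtain ⟨h', heq⟩ := ih (acc.set (pvNorm n a).toNat 1)
      (by simpa using hlen) (fun i hi => hax i (by simp [hi]))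
    refine ⟨h', ?_⟩
    rw [heq]
    by_cases hmem : (k:Int) ∈ rest.map (pvNorm n)
    · simp [hmem]
    · by_cases hka : (k:Int) = pvNorm n a
      · have hkn : (pvNorm n a).toNat = k := by omega
        simp [hka, hkn]
      · have : (k:Int) ∉ (a :: rest).map (pvNorm n) := by
          simp only [List.map_cons, List.mem_cons]
          tauto
        simp only [hmem, if_neg this]
        rw [List.getElem_set]
        have : (pvNorm n a).toNat ≠ k := by omega
        simp [this]

-- the doubling fold shifts the accumulator and adds the tail value
lemma foldl_double_shift (l : List Int) (p : Int) :
    l.foldl (fun p v => 2 * p + v) p =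
      p * 2 ^ l.length + l.foldl (fun p v => 2 * p + v) 0 := by
  induction l generalizing p with
  | nil => simp
  | cons v rest ih =>
    simp only [List.foldl_cons, List.length_cons]
    rw [ih (2 * p + v), ih (2 * 0 + v)]
    ring

-- the doubling fold is the weighted sum of entries
lemma foldl_double_eq_sum (l : List Int) :
    l.foldl (fun p v => 2 * p + v) 0 =
      ∑ k ∈ Finset.range l.length, l.getD k 0 * 2 ^ (l.length - 1 - k) := by
  induction l with
  | nil => simp
  | cons v rest ih =>
    simp only [List.foldl_cons, List.length_cons]
    rw [foldl_double_shift, ih, Finset.sum_range_succ']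
    simp only [List.getD_cons_succ, List.getD_cons_zero]
    have : ∀ k ∈ Finset.range rest.length,
        rest.getD k 0 * 2 ^ (rest.length + 1 - 1 - (k + 1)) =
        rest.getD k 0 * 2 ^ (rest.length - 1 - k) := by
      intro k hk; simp at hk
      congr 2
      omega
    rw [Finset.sum_congr rfl this]
    have : rest.length + 1 - 1 - 0 = rest.length := by omega
    rw [this]
    ring

-- a nodup list of in-range positions sums f like the indicator sum over range n
lemma nodup_sum_eq_indicator (S : List Int) (n : Nat) (f : Int → Int)
    (hnd : S.Nodup) (hb : ∀ p ∈ S, 0 ≤ p ∧ p < n) :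
    (S.map f).sum = ∑ k ∈ Finset.range n, if (k:Int) ∈ S then f k else 0 := by
  induction S with
  | nil => simp
  | cons p rest ih =>
    obtain ⟨hp1, hp2⟩ := hb p (by simp)
    have hnotin : p ∉ rest := (List.nodup_cons.mp hnd).1
    have hsplit : ∀ k ∈ Finset.range n,
        (if (k:Int) ∈ p :: rest then f k else 0) =
        (if (k:Int) ∈ rest then f k else 0) + (if k = p.toNat then f k else 0) := by
      intro k hk
      by_cases hkr : (k:Int) ∈ rest
      · have hne : k ≠ p.toNat := by
          intro h; subst h
          have h2 : (p.toNat : Int) = p := by omega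
          rw [h2] at hkr; exact hnotin hkr
        simp [hkr, hne]
      · by_cases hkp : k = p.toNat
        · subst hkp
          have hk' : ((p.toNat : Nat) : Int) = p := Int.toNat_of_nonneg hp1
          rw [hk']
          simp [hnotin]
        · have hk' : (k:Int) ≠ p := by omega
          simp [hkr, hkp, hk']
    rw [List.map_cons, List.sum_cons,
        ih (List.nodup_cons.mp hnd).2 (fun q hq => hb q (by simp [hq])),
        Finset.sum_congr rfl hsplit, Finset.sum_add_distrib,
        Finset.sum_ite_eq' (Finset.range n) p.toNat (fun k => f (k:Int))]
    have hmem : p.toNat ∈ Finset.range n := by simp; omega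
    have hfp : f ((p.toNat : Nat) : Int) = f p := by rw [Int.toNat_of_nonneg hp1]
    rw [if_pos hmem]
    simp only [hfp]
    ring

lemma foldl_pySetD_length (axis : List Int) (acc : List Int) :
    (axis.foldl (fun acc i => PySem.List.pySetD acc i 1) acc).length = acc.length := by
  induction axis generalizing acc with
  | nil => rfl
  | cons a rest ih => simp [List.foldl_cons, ih, PySem.List.length_pySetD]

-- ===== VERDICT (by name: the statement is the Claim_ definition above) =====
theorem calc_reduce_pattern_spec : Claim_equal_calc_reduce_pattern := by
  intro shape reduce_axis _ hpre
  unfold Spec_calc_reduce_pattern calc_reduce_pattern calc_reduce_pattern_alt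
  set n := shape.length with hn
  have hax : ∀ i ∈ reduce_axis, -(n:Int) ≤ i ∧ i < n := hpre
  -- B's add-loop builds exactly set(map(pvNorm n, reduce_axis))
  have hmap : reduce_axis.foldl
      (fun s i => PySem.Set.add s ((PySem.List.pyGet? (PySem.List.pyRange 0 (n:Int) 1) i).getD 0)) PySem.Set.empty =
      PySem.Set.ofList (reduce_axis.map (pvNorm n)) := by
    rw [PySem.List.foldl_congr_mem' reduce_axis _
          (fun s i => PySem.Set.add s (pvNorm n i)) PySem.Set.empty
          (by intro i hi s
              obtain ⟨h1, h2⟩ := hax i hi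
              rw [pyGet_range_eq_pvNorm h1 h2]),
        ← PySem.Set.update_map_eq_foldl_add, PySem.Set.update_empty]
  simp only [hmap]
  -- the final one_hot
  set oh := reduce_axis.foldl (fun acc i => PySem.List.pySetD acc i 1)
      (shape.map (fun _ => (0:Int))) with hoh
  have hlen0 : (shape.map (fun _ => (0:Int))).length = n := by simp [hn]
  have hchar := foldl_set_getElem reduce_axis (shape.map (fun _ => (0:Int))) n hlen0 hax
  have hohlen : oh.length = n := by
    rw [hoh, foldl_pySetD_length]
    exact hlen0
  -- entries of oh are the indicator of membership
  have hget : ∀ k (hk : k < n), oh.getD k 0 =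
      (if (k:Int) ∈ reduce_axis.map (pvNorm n) then 1 else 0) := by
    intro k hk
    obtain ⟨h, heq⟩ := hchar k hk
    rw [List.getD_eq_getElem oh 0 (by omega), heq]
    split_ifs with hm
    · rfl
    · simp
  -- A side: doubling fold = indicator-weighted sum
  rw [foldl_double_eq_sum, hohlen]
  -- B side: set fold = sum over nodup list
  set S := PySem.Set.ofList (reduce_axis.map (pvNorm n)) with hS
  rw [PySem.List.foldl_add S (fun p => (2:Int) ^ (((n:Int)) - 1 - p).toNat) 0]
  have hSb : ∀ p ∈ S, 0 ≤ p ∧ p < n := by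
    intro p hp
    rw [hS, PySem.Set.mem_ofList] at hp
    obtain ⟨i, hi, rfl⟩ := List.mem_map.mp hp
    obtain ⟨h1, h2⟩ := hax i hi
    exact pvNorm_bounds h1 h2
  rw [nodup_sum_eq_indicator S n _ (PySem.Set.nodup_ofList _) hSb]
  have hterm : ∀ k ∈ Finset.range n,
      oh.getD k 0 * 2 ^ (n - 1 - k) =
      (if (k:Int) ∈ S then (2:Int) ^ (((n:Int)) - 1 - (k:Int)).toNat else 0) := by
    intro k hk
    simp only [Finset.mem_range] at hk
    rw [hget k hk]
    have hexp : (((n:Int)) - 1 - (k:Int)).toNat = n - 1 - k := by omega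
    by_cases hm : (k:Int) ∈ reduce_axis.map (pvNorm n)
    · have hms : (k:Int) ∈ S := by rw [hS, PySem.Set.mem_ofList]; exact hm
      simp [hm, hms, hexp]
    · have hms : (k:Int) ∉ S := by rw [hS, PySem.Set.mem_ofList]; exact hm
      simp [hm, hms]
  rw [Finset.sum_congr rfl hterm]
  ring
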